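-- pv_equiv track=rewrite | github.com/samcialek/serif | backend/serif_scm/smoke_test_numpyro.py | build_parent_edges
-- ===== SOURCE A (Python) =====
-- def build_parent_edges(active_edges: list[tuple[str, str, str]]) -> dict[str, list[dict]]:
--     """Translate active edges -> model's parent_edges shape."""
--     parent_edges: dict[str, list[dict]] = {}
--     for (src, tgt, curve) in active_edges:
--         parent_edges.setdefault(tgt, []).append({
--             "source": src,
--             "edge_key": f"{src}__{tgt}",
--             "curve_type": curve,
--         })
--     return parent_edges
-- ===== SOURCE B (Python) =====
-- def build_parent_edges(active_edges: list[tuple[str, str, str]]) -> dict[str, list[dict]]: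
--     """Two-phase: dedup targets in first-occurrence order, then one filtering comprehension per target."""
--     targets = list(dict.fromkeys(t for (_, t, _) in active_edges))
--     return {
--         t: [
--             {"source": s, "edge_key": f"{s}__{t}", "curve_type": c}
--             for (s, tt, c) in active_edges
--             if tt == t
--         ]
--         for t in targets
--     }
-- ===== Notes on version B (the rewrite author's own statement) =====
-- stated objective: alternative
-- what changed: Replaced the single setdefault hash-accumulation pass with a two-phase decomposition: dedup the targets in first-occurrence order, then build each group's record list by a filtering comprehension over the edges.
import Mathlib
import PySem

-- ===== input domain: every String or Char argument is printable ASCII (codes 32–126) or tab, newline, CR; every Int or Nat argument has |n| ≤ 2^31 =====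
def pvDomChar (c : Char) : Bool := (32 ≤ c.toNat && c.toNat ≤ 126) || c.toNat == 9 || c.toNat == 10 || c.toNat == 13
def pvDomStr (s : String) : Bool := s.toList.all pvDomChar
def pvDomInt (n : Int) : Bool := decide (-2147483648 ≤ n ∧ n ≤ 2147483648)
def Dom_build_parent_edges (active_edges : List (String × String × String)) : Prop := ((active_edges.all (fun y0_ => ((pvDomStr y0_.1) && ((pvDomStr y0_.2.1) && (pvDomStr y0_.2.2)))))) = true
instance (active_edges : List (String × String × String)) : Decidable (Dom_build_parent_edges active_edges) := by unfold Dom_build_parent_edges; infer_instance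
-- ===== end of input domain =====

-- B replaces A's single setdefault-accumulation pass by a two-phase decomposition (dedup targets, then one filter per target); same result, no speed claim.


-- ===== PORT A =====
-- the record dict literal {"source": src, "edge_key": f"{src}__{tgt}", "curve_type": curve}:
-- three distinct literal keys, so its assoc-list representation is the literal list
def pvRecA (e : String × String × String) : List (String × String) :=
  [("source", e.1), ("edge_key", e.1 ++ "__" ++ e.2.1), ("curve_type", e.2.2)]

-- parent_edges.setdefault(tgt, []).append(rec) ≡ Dict.modify tgt [] (· ++ [rec]) (d[k] = f(d.get(k, [])))
def build_parent_edges (active_edges : List (String × String × String)) : List (String × List (List (String × String))) :=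
  (active_edges.foldl
    (fun d e => d.modify e.2.1 [] (fun l => l ++ [pvRecA e]))
    (PySem.Dict.empty : PySem.Dict String (List (List (String × String))))).items

-- ===== PORT B =====
def pvRecB (t : String) (e : String × String × String) : List (String × String) :=
  [("source", e.1), ("edge_key", e.1 ++ "__" ++ t), ("curve_type", e.2.2)]

-- list(dict.fromkeys(targets)) = PySem.List.dedup; then one filtering comprehension per target
def build_parent_edges_alt (active_edges : List (String × String × String)) : List (String × List (List (String × String))) :=
  (PySem.List.dedup (active_edges.map (fun e => e.2.1))).map
    (fun t => (t, (active_edges.filter (fun e => e.2.1 == t)).map (pvRecB t)))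

-- ===== PRECONDITION & SPEC =====
def Spec_build_parent_edges (active_edges : List (String × String × String)) (out : List (String × List (List (String × String)))) : Prop := out = build_parent_edges_alt active_edges
instance (active_edges : List (String × String × String)) (out : List (String × List (List (String × String)))) : Decidable (Spec_build_parent_edges active_edges out) := by unfold Spec_build_parent_edges; infer_instance

-- ===== CLAIM (what is proved, stated in full; the proofs are below) =====
def Claim_equal_build_parent_edges : Prop := ∀ (active_edges : List (String × String × String)), Dom_build_parent_edges active_edges → Spec_build_parent_edges active_edges (build_parent_edges active_edges)

-- ===== LEMMAS AND PROOFS =====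

-- A's fold, rewritten as a fold over (key, record) pairs
theorem pvA_foldl_pairs (es : List (String × String × String)) :
    build_parent_edges es =
      ((es.map (fun e => (e.2.1, pvRecA e))).foldl
        (fun d p => d.modify p.1 [] (fun l => l ++ [p.2]))
        (PySem.Dict.empty : PySem.Dict String (List (List (String × String))))).items := by
  unfold build_parent_edges
  rw [List.foldl_map]

-- ===== VERDICT (by name: the statement is the Claim_ definition above) =====
theorem build_parent_edges_spec : Claim_equal_build_parent_edges := by
  intro es _
  show build_parent_edges es = build_parent_edges_alt es
  rw [pvA_foldl_pairs]
  set l := es.map (fun e => (e.2.1, pvRecA e)) with hl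
  set d := l.foldl (fun d p => d.modify p.1 [] (fun l => l ++ [p.2]))
    (PySem.Dict.empty : PySem.Dict String (List (List (String × String)))) with hd
  have hkeys : d.keys = PySem.Set.ofList (es.map (fun e => e.2.1)) := by
    have h1 : d.keys = PySem.Set.update PySem.Dict.empty.keys (l.map (fun p => p.1)) :=
      PySem.Dict.keys_foldl_modify_key l (fun p => p.1) [] (fun _ p => fun x => x ++ [p.2])
        PySem.Dict.empty
    rw [h1, hl, List.map_map, PySem.Dict.keys_empty]
    rfl
  have hnodup : d.keys.Nodup := by
    rw [hkeys]; exact PySem.Set.nodup_ofList _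
  rw [PySem.Dict.items_eq_map_keys d hnodup [], hkeys]
  unfold build_parent_edges_alt
  rw [PySem.List.dedup_eq_ofList]
  apply List.map_congr_left
  intro t _
  refine Prod.ext rfl ?_
  show d.getD t [] = (es.filter (fun e => e.2.1 == t)).map (pvRecB t)
  have h2 : d.getD t [] =
      PySem.Dict.empty.getD t [] ++ ((l.filter (fun p => p.1 == t)).map (fun p => p.2)) :=
    PySem.Dict.getD_foldl_modify_append l PySem.Dict.empty t
  rw [h2, PySem.Dict.getD_empty, List.nil_append, hl, List.filter_map, List.map_map]
  apply List.map_congr_left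
  intro e he
  have ht : e.2.1 = t := by
    have := List.of_mem_filter he
    simpa using this
  simp [Function.comp, pvRecA, pvRecB, ht]
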